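-- pv_equiv track=rewrite | github.com/superbunny38/2022-3CodingTestPrepTeam | Week5/인구 이동/류채은.py | move_people
-- ===== SOURCE A (Python) =====
-- def break_barrier(graph,cur_pos, L,R,visited):
--     dx = [-1,1,0,0]
--     dy = [0,0,1,-1]
--     N = len(graph)
--     queue = [cur_pos]
--     break_list = [cur_pos]
--     summ = graph[cur_pos[0]][cur_pos[1]]
--     while queue:
--         popped = queue.pop(0)
--         y,x = popped[0],popped[1]
--         for move_y, move_x in zip(dy,dx):
--             if 0<=y+move_y<N and 0<=x+move_x<N and visited[move_y+y][move_x+x] == 0 and L<=abs(graph[move_y+y][move_x+x]-graph[y][x]) <=R: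
--                 visited[y+move_y][x+move_x] = 1
--                 queue.append([y+move_y,x+move_x])
--                 break_list.append([y+move_y,x+move_x])
--                 summ+= graph[y+move_y][x+move_x]
--
--     if len(break_list) >1:
--         n_fill = int(summ/len(break_list))
--         for break_ in break_list:
--             break_y,break_x= break_[0],break_[1]
--             graph[break_y][break_x] = n_fill
--         return True
--     else:
--         return False
--
-- def move_people(graph,L,R):
--     N = len(graph)
--     visited = [[0 for _ in range(N)] for tmp in range(N)]
--     move = False
--     for i in range(N):
--         for j in range(N):
--             if visited[i][j] ==0:
--                 visited[i][j] = 1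
--                 cur_pos = [i,j]
--                 res = break_barrier(graph,cur_pos,L,R,visited)
--                 if res == True:
--                     move = True
--     return move
-- ===== SOURCE B (Python) =====
-- def move_people(graph, L, R):
--     # Union-find based one-round merge: same return value and same in-place
--     # mutation of graph as the BFS version, built from right/down edges.
--     N = len(graph)
--     moved = False
--     for i in range(N):
--         for j in range(N):
--             if j + 1 < N and L <= abs(graph[i][j] - graph[i][j + 1]) <= R:
--                 moved = True
--             if i + 1 < N and L <= abs(graph[i][j] - graph[i + 1][j]) <= R:
--                 moved = True
--     if not moved:
--         return False
--     parent = list(range(N * N))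
--
--     def find(a):
--         while parent[a] != a:
--             parent[a] = parent[parent[a]]
--             a = parent[a]
--         return a
--
--     for i in range(N):
--         for j in range(N):
--             if j + 1 < N and L <= abs(graph[i][j] - graph[i][j + 1]) <= R:
--                 ra, rb = find(i * N + j), find(i * N + j + 1)
--                 if ra != rb:
--                     parent[ra] = rb
--             if i + 1 < N and L <= abs(graph[i][j] - graph[i + 1][j]) <= R:
--                 ra, rb = find(i * N + j), find((i + 1) * N + j)
--                 if ra != rb:
--                     parent[ra] = rb
--     sums = {}
--     counts = {}
--     for i in range(N):
--         for j in range(N):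
--             r = find(i * N + j)
--             sums[r] = sums.get(r, 0) + graph[i][j]
--             counts[r] = counts.get(r, 0) + 1
--     for i in range(N):
--         for j in range(N):
--             r = find(i * N + j)
--             if counts[r] > 1:
--                 graph[i][j] = int(sums[r] / counts[r])
--     return True
-- ===== Notes on version B (the rewrite author's own statement) =====
-- stated objective: faster
-- what changed: A's per-start BFS flood fill with a visited matrix and O(n) queue.pop(0) is replaced by a single right/down edge scan to decide the return value plus an iterative union-find merge (with sum/count tables per root) to perform the same in-place averaging; the Lean equivalence covers the return value, the identical mutation is tested in Python.
-- outside the precondition, e.g. on move_people([[1, 2], [3]], 0, 5): A raises IndexError, B raises IndexError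
import Mathlib
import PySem

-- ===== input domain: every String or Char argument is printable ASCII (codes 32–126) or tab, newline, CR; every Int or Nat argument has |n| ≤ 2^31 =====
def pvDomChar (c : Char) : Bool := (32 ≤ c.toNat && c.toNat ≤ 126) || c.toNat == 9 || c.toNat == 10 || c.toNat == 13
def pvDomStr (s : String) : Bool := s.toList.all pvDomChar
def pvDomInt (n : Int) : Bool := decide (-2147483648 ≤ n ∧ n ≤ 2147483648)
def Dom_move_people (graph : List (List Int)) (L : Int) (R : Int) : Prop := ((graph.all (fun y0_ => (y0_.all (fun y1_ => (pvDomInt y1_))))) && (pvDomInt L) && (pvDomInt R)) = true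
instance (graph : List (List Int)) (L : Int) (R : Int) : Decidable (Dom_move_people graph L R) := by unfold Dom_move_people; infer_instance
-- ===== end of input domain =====

-- B replaces A's per-start BFS (with O(n) queue.pop(0)) by a single edge scan plus a
-- union-find merge (measurably faster in a timing run); both mutate `graph`
-- identically in Python; the Lean equivalence below is about the RETURN value only
-- (the mutated argument is not returned).

-- ===== PORT A =====
-- A's BFS flood fill (`break_barrier`): Python's list-of-lists state is kept as is.
-- dy/dx zipped in A give the direction order (0,-1),(0,1),(1,0),(-1,0).
def pvDirs : List (Int × Int) := [(0, -1), (0, 1), (1, 0), (-1, 0)]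

-- graph[y][x]; guarded in-range at every use, so the defaults are never read.
def pvCell (g : List (List Int)) (y x : Int) : Int := (g.getD y.toNat []).getD x.toNat 0

-- visited[y][x]; default 1 (all real accesses are to the in-range N×N visited matrix,
-- so the default is never read; 1 keeps the termination measure sound on junk states).
def pvVis (v : List (List Int)) (y x : Int) : Int := (v.getD y.toNat []).getD x.toNat 1

-- visited[y][x] = 1
def pvSetVis (v : List (List Int)) (y x : Int) : List (List Int) :=
  v.set y.toNat ((v.getD y.toNat []).set x.toNat 1)

-- the combined condition of A's inner if (same order as the Python and)
def pvGuard (g : List (List Int)) (L R N : Int) (v : List (List Int)) (y x ny nx : Int) : Bool :=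
  decide (0 ≤ ny) && decide (ny < N) && decide (0 ≤ nx) && decide (nx < N) &&
  (pvVis v ny nx == 0) &&
  decide (L ≤ |pvCell g ny nx - pvCell g y x|) && decide (|pvCell g ny nx - pvCell g y x| ≤ R)

-- number of 0 entries of visited: termination measure for the while loop
def countZeros : List (List Int) → Nat
  | [] => 0
  | r :: t => r.count 0 + countZeros t

-- the `for move_y, move_x in zip(dy,dx)` loop body: state = (visited, queue, break_list)
def pvScan (g : List (List Int)) (L R N : Int) (y x : Int)
    (st : List (List Int) × List (Int × Int) × List (Int × Int)) :
    List (Int × Int) → List (List Int) × List (Int × Int) × List (Int × Int)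
  | [] => st
  | d :: ds =>
      pvScan g L R N y x
        (if pvGuard g L R N st.1 y x (y + d.1) (x + d.2) then
          (pvSetVis st.1 (y + d.1) (x + d.2),
           st.2.1 ++ [(y + d.1, x + d.2)],
           st.2.2 ++ [(y + d.1, x + d.2)])
        else st) ds

theorem pv_count0_set (row : List Int) (j : Nat) (h : row.getD j 1 = 0) :
    (row.set j 1).count 0 + 1 = row.count 0 := by
  induction row generalizing j with
  | nil => simp [List.getD] at h
  | cons a t ih =>
    cases j with
    | zero =>
      simp [List.getD] at h
      subst h
      simp [List.count_cons]
    | succ j =>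
      have h' : t.getD j 1 = 0 := by simpa [List.getD] using h
      have := ih j h'
      simp [List.count_cons]
      omega

theorem pv_countZeros_set (v : List (List Int)) (i j : Nat) (h : (v.getD i []).getD j 1 = 0) :
    countZeros (v.set i ((v.getD i []).set j 1)) + 1 = countZeros v := by
  induction v generalizing i with
  | nil => simp [List.getD] at h
  | cons r t ih =>
    cases i with
    | zero =>
      simp [List.getD] at h ⊢
      have := pv_count0_set r j h
      simp [countZeros]
      omega
    | succ i =>
      have h' : (t.getD i []).getD j 1 = 0 := by simpa [List.getD] using h
      have := ih i h'
      simp only [List.getD_cons_succ, List.set_cons_succ, countZeros] at this ⊢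
      omega

theorem pv_scan_measure (g : List (List Int)) (L R N : Int) (y x : Int)
    (ds : List (Int × Int)) (st : List (List Int) × List (Int × Int) × List (Int × Int)) :
    countZeros (pvScan g L R N y x st ds).1 + (pvScan g L R N y x st ds).2.1.length ≤
      countZeros st.1 + st.2.1.length := by
  induction ds generalizing st with
  | nil => simp [pvScan]
  | cons d ds ih =>
    rw [pvScan]
    split
    · next hg =>
      refine le_trans (ih _) ?_
      have h0 : pvVis st.1 (y + d.1) (x + d.2) = 0 := by
        simp [pvGuard] at hg
        tauto
      have := pv_countZeros_set st.1 (y + d.1).toNat (x + d.2).toNat (by simpa [pvVis] using h0)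
      simp only [pvSetVis, List.getD, List.length_append, List.length_cons, List.length_nil] at this ⊢
      omega
    · exact ih _

-- the while-queue loop of break_barrier; returns (visited, break_list)
def bfsA (g : List (List Int)) (L R N : Int) (queue : List (Int × Int))
    (visited : List (List Int)) (blist : List (Int × Int)) :
    List (List Int) × List (Int × Int) :=
  match queue with
  | [] => (visited, blist)
  | (y, x) :: rest =>
      let st := pvScan g L R N y x (visited, rest, blist) pvDirs
      bfsA g L R N st.2.1 st.1 st.2.2
termination_by countZeros visited + queue.length
decreasing_by
  have := pv_scan_measure g L R N y x pvDirs (visited, rest, blist)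
  simp at this ⊢
  omega

-- move_people: N×N zero visited, scan all cells, BFS each unvisited one;
-- the average fill writes only into the mutated argument (see header) and is omitted.
def move_people (graph : List (List Int)) (L : Int) (R : Int) : Bool :=
  let N : Int := (graph.length : Int)
  let v0 := List.replicate graph.length (List.replicate graph.length (0 : Int))
  let res := (List.range graph.length).foldl (fun st (i : Nat) =>
    (List.range graph.length).foldl (fun st (j : Nat) =>
      if pvVis st.1 (i : Int) (j : Int) == 0 then
        let v1 := pvSetVis st.1 (i : Int) (j : Int)
        let r := bfsA graph L R N [((i : Int), (j : Int))] v1 [((i : Int), (j : Int))]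
        (r.1, st.2 || decide (1 < r.2.length))
      else st) st) (v0, false)
  res.2

-- ===== PORT B =====
-- graph[i][j] for Source B (Nat indices from range)
def bCell (g : List (List Int)) (i j : Nat) : Int := (g.getD i []).getD j 0

-- L <= abs(graph[i][j] - graph[i'][j']) <= R
def bCond (g : List (List Int)) (L R : Int) (i j i' j' : Nat) : Bool :=
  decide (L ≤ |bCell g i j - bCell g i' j'|) && decide (|bCell g i j - bCell g i' j'| ≤ R)

-- the `moved` edge scan of Source B; the union-find fill mutates only the argument
-- (see header) and is omitted here.
def move_people_alt (graph : List (List Int)) (L : Int) (R : Int) : Bool :=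
  let N := graph.length
  (List.range N).foldl (fun moved i =>
    (List.range N).foldl (fun moved j =>
      let moved := if decide (j + 1 < N) && bCond graph L R i j i (j + 1) then true else moved
      if decide (i + 1 < N) && bCond graph L R i j (i + 1) j then true else moved)
      moved) false

-- ===== PRECONDITION & SPEC =====
-- Pre_ excludes exactly the ragged grids on which Python A raises IndexError
-- (a row shorter than len(graph) is indexed at columns up to len(graph)-1).
def Pre_move_people (graph : List (List Int)) (L : Int) (R : Int) : Prop :=
  ∀ row ∈ graph, graph.length ≤ row.length
instance (graph : List (List Int)) (L : Int) (R : Int) : Decidable (Pre_move_people graph L R) := by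
  unfold Pre_move_people; infer_instance

def pvWitness_move_people : List (List Int) × Int × Int := ([[1, 5], [9, 2]], 2, 40)

def Spec_move_people (graph : List (List Int)) (L : Int) (R : Int) (out : Bool) : Prop := out = move_people_alt graph L R
instance (graph : List (List Int)) (L : Int) (R : Int) (out : Bool) : Decidable (Spec_move_people graph L R out) := by unfold Spec_move_people; infer_instance

-- ===== CLAIM (what is proved, stated in full; the proofs are below) =====
def Claim_equal_move_people : Prop := ∀ (graph : List (List Int)) (L : Int) (R : Int), Dom_move_people graph L R → Pre_move_people graph L R → Spec_move_people graph L R (move_people graph L R)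


-- ===== LEMMAS AND PROOFS =====

-- in-range coordinate
def inRZ (N y : Int) : Prop := 0 ≤ y ∧ y < N

-- A's merge condition between cell (y,x) and cell (ny,nx)
def condZ (g : List (List Int)) (L R y x ny nx : Int) : Prop :=
  L ≤ |pvCell g ny nx - pvCell g y x| ∧ |pvCell g ny nx - pvCell g y x| ≤ R

-- (y,x) is the endpoint of some qualifying edge
def EP (g : List (List Int)) (L R N y x : Int) : Prop :=
  ∃ d ∈ pvDirs, inRZ N (y + d.1) ∧ inRZ N (x + d.2) ∧ condZ g L R y x (y + d.1) (x + d.2)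

-- invariant: no visited cell is the endpoint of a qualifying edge
def QInv (g : List (List Int)) (L R N : Int) (v : List (List Int)) : Prop :=
  ∀ y x : Int, inRZ N y → inRZ N x → EP g L R N y x → pvVis v y x = 0

-- some qualifying edge exists in the grid
def hasEdgeZ (g : List (List Int)) (L R : Int) : Prop :=
  ∃ y x : Int, inRZ (g.length : Int) y ∧ inRZ (g.length : Int) x ∧ EP g L R (g.length : Int) y x

-- the elementwise body of A's outer double loop (definitionally what move_people folds)
def bodyA (g : List (List Int)) (L R : Int) (st : List (List Int) × Bool) (i j : Nat) :
    List (List Int) × Bool :=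
  if pvVis st.1 (i : Int) (j : Int) == 0 then
    ((bfsA g L R (g.length : Int) [((i : Int), (j : Int))]
        (pvSetVis st.1 (i : Int) (j : Int)) [((i : Int), (j : Int))]).1,
     st.2 || decide (1 < (bfsA g L R (g.length : Int) [((i : Int), (j : Int))]
        (pvSetVis st.1 (i : Int) (j : Int)) [((i : Int), (j : Int))]).2.length))
  else st

theorem setVis_vals (v : List (List Int)) (a b y x : Int) :
    pvVis (pvSetVis v a b) y x = 1 ∨ pvVis (pvSetVis v a b) y x = pvVis v y x := by
  unfold pvVis pvSetVis
  simp only [List.getD_eq_getElem?_getD, List.getElem?_set]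
  by_cases h1 : a.toNat = y.toNat
  · rw [if_pos h1, h1]
    by_cases h2 : y.toNat < v.length
    · rw [if_pos h2]
      simp only [Option.getD_some, List.getElem?_set]
      by_cases h3 : b.toNat = x.toNat
      · rw [if_pos h3]
        by_cases h4 : b.toNat < (v[y.toNat]?.getD []).length
        · rw [if_pos h4]; left; rfl
        · rw [if_neg h4]; left; rfl
      · rw [if_neg h3]; right; rfl
    · rw [if_neg h2]
      have hn : v[y.toNat]? = none := List.getElem?_eq_none (by omega)
      rw [hn]; right; rfl
  · rw [if_neg h1]; right; rfl

theorem setVis_self (v : List (List Int)) (a b : Int) : pvVis (pvSetVis v a b) a b = 1 := by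
  unfold pvVis pvSetVis
  by_cases h2 : a.toNat < v.length
  · by_cases h3 : b.toNat < v[a.toNat].length
    · simp [List.getD_eq_getElem?_getD, List.getElem?_set, h2, h3]
    · simp [List.getD_eq_getElem?_getD, List.getElem?_set, h2, h3]
  · simp [List.getD_eq_getElem?_getD, List.getElem?_set, h2]

theorem setVis_ne (v : List (List Int)) (a b y x : Int)
    (h : y.toNat ≠ a.toNat ∨ x.toNat ≠ b.toNat) :
    pvVis (pvSetVis v a b) y x = pvVis v y x := by
  unfold pvVis pvSetVis
  simp only [List.getD_eq_getElem?_getD, List.getElem?_set]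
  by_cases h1 : a.toNat = y.toNat
  · rw [if_pos h1, h1]
    have hx : x.toNat ≠ b.toNat := by
      rcases h with h | h
      · exact absurd h1.symm h
      · exact h
    by_cases h2 : y.toNat < v.length
    · rw [if_pos h2]
      simp only [Option.getD_some, List.getElem?_set]
      rw [if_neg (fun hh => hx hh.symm)]
    · rw [if_neg h2]
      have hn : v[y.toNat]? = none := List.getElem?_eq_none (by omega)
      rw [hn]
  · rw [if_neg h1]

theorem scan_blen_mono (g : List (List Int)) (L R N y x : Int) (ds : List (Int × Int)) (st) :
    st.2.2.length ≤ (pvScan g L R N y x st ds).2.2.length := by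
  induction ds generalizing st with
  | nil => simp [pvScan]
  | cons d ds ih =>
    rw [pvScan]
    split
    · exact le_trans (by simp) (ih _)
    · exact ih _

theorem scan_cases (g : List (List Int)) (L R N y x : Int) (ds : List (Int × Int)) (st) :
    (pvScan g L R N y x st ds = st ∧
      ∀ d ∈ ds, pvGuard g L R N st.1 y x (y + d.1) (x + d.2) = false) ∨
    st.2.2.length < (pvScan g L R N y x st ds).2.2.length := by
  induction ds generalizing st with
  | nil => exact Or.inl ⟨rfl, by simp⟩
  | cons d ds ih =>
    rw [pvScan]
    by_cases hg : pvGuard g L R N st.1 y x (y + d.1) (x + d.2) = true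
    · right
      rw [if_pos hg]
      refine lt_of_lt_of_le ?_ (scan_blen_mono g L R N y x ds _)
      simp
    · rw [if_neg hg]
      rcases ih st with ⟨heq, hall⟩ | hlt
      · left
        refine ⟨heq, ?_⟩
        intro d' hd'
        rcases List.mem_cons.1 hd' with h | h
        · subst h; simpa using hg
        · exact hall d' h
      · exact Or.inr hlt

theorem scan_const (g : List (List Int)) (L R N y x : Int) (ds : List (Int × Int)) (st)
    (h : ∀ (v' : List (List Int)), ∀ d ∈ ds, pvGuard g L R N v' y x (y + d.1) (x + d.2) = false) :
    pvScan g L R N y x st ds = st := by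
  induction ds generalizing st with
  | nil => rfl
  | cons d ds ih =>
    rw [pvScan, if_neg (by simp [h st.1 d (List.mem_cons_self)])]
    exact ih st (fun v' d' hd' => h v' d' (List.mem_cons_of_mem _ hd'))

theorem scan_vis_mono (g : List (List Int)) (L R N a b y x : Int) (ds : List (Int × Int)) (st)
    (h : pvVis st.1 y x ≠ 0) : pvVis (pvScan g L R N a b st ds).1 y x ≠ 0 := by
  induction ds generalizing st with
  | nil => exact h
  | cons d ds ih =>
    rw [pvScan]
    split
    · refine ih _ ?_
      rcases setVis_vals st.1 (a + d.1) (b + d.2) y x with hv | hv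
      · simp [hv]
      · simp only [hv]; exact h
    · exact ih _ h

theorem bfs_blen_mono (g : List (List Int)) (L R N : Int) (q : List (Int × Int)) (v bl) :
    bl.length ≤ (bfsA g L R N q v bl).2.length := by
  fun_induction bfsA g L R N q v bl with
  | case1 => simp
  | case2 v bl y x rest st ih =>
    exact le_trans (scan_blen_mono g L R N y x pvDirs (v, rest, bl)) ih

theorem bfs_vis_mono (g : List (List Int)) (L R N : Int) (q : List (Int × Int)) (v bl) (y x : Int)
    (h : pvVis v y x ≠ 0) : pvVis (bfsA g L R N q v bl).1 y x ≠ 0 := by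
  fun_induction bfsA g L R N q v bl with
  | case1 v bl => exact h
  | case2 v bl a b rest st ih =>
    exact ih (scan_vis_mono g L R N a b y x pvDirs (v, rest, bl) h)

theorem bfs_unchanged (g : List (List Int)) (L R N : Int) (q : List (Int × Int)) (v bl)
    (h : (bfsA g L R N q v bl).2.length = bl.length) : bfsA g L R N q v bl = (v, bl) := by
  revert h
  fun_induction bfsA g L R N q v bl with
  | case1 v bl => intro _; rfl
  | case2 v bl y x rest st ih =>
    intro h
    rcases scan_cases g L R N y x pvDirs (v, rest, bl) with ⟨heq, _⟩ | hlt
    · have hst : st = (v, rest, bl) := heq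
      rw [hst] at h ih ⊢
      exact ih h
    · exfalso
      have hmono := bfs_blen_mono g L R N st.2.1 st.1 st.2.2
      have : bl.length < st.2.2.length := hlt
      omega

theorem bfs_no_edge (g : List (List Int)) (L R N : Int) (q : List (Int × Int)) (v bl)
    (hno : ∀ y x : Int, inRZ N y → inRZ N x → ¬ EP g L R N y x)
    (hq : ∀ p ∈ q, inRZ N p.1 ∧ inRZ N p.2) : bfsA g L R N q v bl = (v, bl) := by
  revert hq
  fun_induction bfsA g L R N q v bl with
  | case1 v bl => intro _; rfl
  | case2 v bl y x rest st ih =>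
    intro hq
    have hyx := hq (y, x) (List.mem_cons_self)
    have hst : st = (v, rest, bl) := by
      apply scan_const
      intro v' d hd
      by_contra hg
      rw [Bool.not_eq_false] at hg
      simp only [pvGuard, Bool.and_eq_true, decide_eq_true_eq, beq_iff_eq] at hg
      exact hno y x hyx.1 hyx.2
        ⟨d, hd, ⟨hg.1.1.1.1.1.1, hg.1.1.1.1.1.2⟩, ⟨hg.1.1.1.1.2, hg.1.1.1.2⟩, hg.1.2, hg.2⟩
    rw [hst] at ih ⊢
    exact ih (fun p hp => hq p (List.mem_cons_of_mem _ hp))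

theorem condZ_symm (g : List (List Int)) (L R y x p q : Int)
    (h : condZ g L R y x p q) : condZ g L R p q y x := by
  unfold condZ at *
  rw [abs_sub_comm]
  exact h

theorem EP_neighbor (g : List (List Int)) (L R N y x : Int) (d : Int × Int) (hd : d ∈ pvDirs)
    (hy : inRZ N y) (hx : inRZ N x) (hny : inRZ N (y + d.1)) (hnx : inRZ N (x + d.2))
    (hc : condZ g L R y x (y + d.1) (x + d.2)) : EP g L R N (y + d.1) (x + d.2) := by
  have hc' := condZ_symm g L R y x (y + d.1) (x + d.2) hc
  simp only [pvDirs, List.mem_cons, List.not_mem_nil, or_false] at hd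
  rcases hd with rfl | rfl | rfl | rfl
  · refine ⟨(0, 1), by simp [pvDirs], ?_, ?_, ?_⟩
    · simpa using hny
    · have e : x + (-1 : Int) + 1 = x := by ring
      rw [e]; exact hx
    · have e1 : y + (0 : Int) + 0 = y := by ring
      have e2 : x + (-1 : Int) + 1 = x := by ring
      rw [e1, e2]
      simpa using hc'
  · refine ⟨(0, -1), by simp [pvDirs], ?_, ?_, ?_⟩
    · simpa using hny
    · have e : x + (1 : Int) + -1 = x := by ring
      rw [e]; exact hx
    · have e1 : y + (0 : Int) + 0 = y := by ring
      have e2 : x + (1 : Int) + -1 = x := by ring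
      rw [e1, e2]
      simpa using hc'
  · refine ⟨(-1, 0), by simp [pvDirs], ?_, ?_, ?_⟩
    · have e : y + (1 : Int) + -1 = y := by ring
      rw [e]; exact hy
    · simpa using hnx
    · have e1 : y + (1 : Int) + -1 = y := by ring
      have e2 : x + (0 : Int) + 0 = x := by ring
      rw [e1, e2]
      simpa using hc'
  · refine ⟨(1, 0), by simp [pvDirs], ?_, ?_, ?_⟩
    · have e : y + (-1 : Int) + 1 = y := by ring
      rw [e]; exact hy
    · simpa using hnx
    · have e1 : y + (-1 : Int) + 1 = y := by ring
      have e2 : x + (0 : Int) + 0 = x := by ring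
      rw [e1, e2]
      simpa using hc'

theorem bfs_start (g : List (List Int)) (L R N : Int) (v : List (List Int)) (y x : Int)
    (hQ : QInv g L R N v) (hy : inRZ N y) (hx : inRZ N x) (hEP : EP g L R N y x) :
    1 < (bfsA g L R N [(y, x)] (pvSetVis v y x) [(y, x)]).2.length := by
  obtain ⟨d, hd, hny, hnx, hc⟩ := hEP
  rw [bfsA]
  have hmono := bfs_blen_mono g L R N
    (pvScan g L R N y x (pvSetVis v y x, [], [(y, x)]) pvDirs).2.1
    (pvScan g L R N y x (pvSetVis v y x, [], [(y, x)]) pvDirs).1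
    (pvScan g L R N y x (pvSetVis v y x, [], [(y, x)]) pvDirs).2.2
  rcases scan_cases g L R N y x pvDirs (pvSetVis v y x, [], [(y, x)]) with ⟨heq, hall⟩ | hlt
  · exfalso
    have hg := hall d hd
    have hEPn : EP g L R N (y + d.1) (x + d.2) := EP_neighbor g L R N y x d hd hy hx hny hnx hc
    have hvis0 : pvVis v (y + d.1) (x + d.2) = 0 := hQ _ _ hny hnx hEPn
    have hne : (y + d.1).toNat ≠ y.toNat ∨ (x + d.2).toNat ≠ x.toNat := by
      simp only [pvDirs, List.mem_cons, List.not_mem_nil, or_false] at hd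
      rcases hy with ⟨hy0, _⟩
      rcases hx with ⟨hx0, _⟩
      rcases hny with ⟨hny0, _⟩
      rcases hnx with ⟨hnx0, _⟩
      rcases hd with rfl | rfl | rfl | rfl <;> simp <;> omega
    have hvis1 : pvVis (pvSetVis v y x) (y + d.1) (x + d.2) = 0 := by
      rw [setVis_ne v y x _ _ hne]
      exact hvis0
    have hgt : pvGuard g L R N (pvSetVis v y x) y x (y + d.1) (x + d.2) = true := by
      simp only [pvGuard, Bool.and_eq_true, decide_eq_true_eq, beq_iff_eq]
      exact ⟨⟨⟨⟨⟨⟨hny.1, hny.2⟩, hnx.1⟩, hnx.2⟩, hvis1⟩, hc.1⟩, hc.2⟩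
    rw [hg] at hgt
    exact Bool.false_ne_true hgt
  · simp only [List.length_cons, List.length_nil] at hlt
    omega

theorem Q_setVis (g : List (List Int)) (L R N : Int) (v : List (List Int)) (y x : Int)
    (hQv : QInv g L R N v) (hy : inRZ N y) (hx : inRZ N x) (hEP : ¬ EP g L R N y x) :
    QInv g L R N (pvSetVis v y x) := by
  intro y' x' h1 h2 hEP'
  by_cases hsame : y' = y ∧ x' = x
  · exact absurd (hsame.1 ▸ hsame.2 ▸ hEP') hEP
  · have hne : y'.toNat ≠ y.toNat ∨ x'.toNat ≠ x.toNat := by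
      rcases hy with ⟨hy0, _⟩
      rcases hx with ⟨hx0, _⟩
      rcases h1 with ⟨h10, _⟩
      rcases h2 with ⟨h20, _⟩
      rcases not_and_or.1 hsame with h | h
      · left; omega
      · right; omega
    rw [setVis_ne v y x _ _ hne]
    exact hQv y' x' h1 h2 hEP'

theorem move_people_eq (g : List (List Int)) (L R : Int) :
    move_people g L R =
      ((List.range g.length).foldl (fun st i =>
        (List.range g.length).foldl (fun st j => bodyA g L R st i j) st)
        (List.replicate g.length (List.replicate g.length (0 : Int)), false)).2 := by
  simp only [move_people, bodyA]

theorem foldl_pres {α β : Type} {P : α → Prop} {f : α → β → α} (l : List β)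
    (h : ∀ a b, b ∈ l → P a → P (f a b)) {a : α} (ha : P a) : P (l.foldl f a) := by
  induction l generalizing a with
  | nil => exact ha
  | cons b t ih => exact ih (fun a c hc => h a c (List.mem_cons_of_mem _ hc)) (h a b (List.mem_cons_self) ha)

theorem range_fold_all {α : Type} (f : α → Nat → α) (n : Nat) (P : α → Nat → Prop)
    (hpres : ∀ a k m, P a k → P (f a m) k)
    (hest : ∀ a k, k < n → P (f a k) k) :
    ∀ (a : α) (k : Nat), k < n → P ((List.range n).foldl f a) k := by
  induction n with
  | zero => intro a k hk; omega
  | succ n ih =>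
    intro a k hk
    rw [List.range_succ, List.foldl_append]
    rcases Nat.lt_or_ge k n with h | h
    · exact hpres _ _ _ (ih (fun a k hk => hest a k (by omega)) a k h)
    · have : k = n := by omega
      subst this
      exact hest _ _ (by omega)

theorem bodyA_vis_pres (g : List (List Int)) (L R : Int) (st) (i j : Nat) (y x : Int)
    (h : pvVis st.1 y x ≠ 0) : pvVis (bodyA g L R st i j).1 y x ≠ 0 := by
  unfold bodyA
  split
  · apply bfs_vis_mono
    rcases setVis_vals st.1 (i : Int) (j : Int) y x with hv | hv
    · simp [hv]
    · rw [hv]; exact h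
  · exact h

theorem bodyA_vis_self (g : List (List Int)) (L R : Int) (st) (i j : Nat) :
    pvVis (bodyA g L R st i j).1 (i : Int) (j : Int) ≠ 0 := by
  unfold bodyA
  split
  · apply bfs_vis_mono
    rw [setVis_self]
    decide
  · next hvis =>
    simp only [beq_iff_eq] at hvis
    simpa using hvis

theorem bodyA_false_pres (g : List (List Int)) (L R : Int) (st) (i j : Nat)
    (hi : i < g.length) (hj : j < g.length)
    (hno : ∀ y x : Int, inRZ (g.length : Int) y → inRZ (g.length : Int) x → ¬ EP g L R (g.length : Int) y x)
    (h : st.2 = false) : (bodyA g L R st i j).2 = false := by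
  unfold bodyA
  split
  · have hr := bfs_no_edge g L R (g.length : Int) [((i : Int), (j : Int))]
      (pvSetVis st.1 (i : Int) (j : Int)) [((i : Int), (j : Int))] hno
      (by
        intro p hp
        simp only [List.mem_singleton] at hp
        subst hp
        refine ⟨⟨Int.natCast_nonneg i, ?_⟩, ⟨Int.natCast_nonneg j, ?_⟩⟩
        · show (i : Int) < (g.length : Int); exact_mod_cast hi
        · show (j : Int) < (g.length : Int); exact_mod_cast hj)
    rw [hr]
    simp [h]
  · exact h

theorem bodyA_inv (g : List (List Int)) (L R : Int) (st) (i j : Nat)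
    (hi : i < g.length) (hj : j < g.length)
    (h : st.2 = true ∨ QInv g L R (g.length : Int) st.1) :
    (bodyA g L R st i j).2 = true ∨ QInv g L R (g.length : Int) (bodyA g L R st i j).1 := by
  rcases h with htrue | hQ
  · left
    unfold bodyA
    split
    · simp [htrue]
    · exact htrue
  · unfold bodyA
    split
    · next hvis =>
      simp only [beq_iff_eq] at hvis
      have hiR : inRZ (g.length : Int) (i : Int) := ⟨Int.natCast_nonneg i, by exact_mod_cast hi⟩
      have hjR : inRZ (g.length : Int) (j : Int) := ⟨Int.natCast_nonneg j, by exact_mod_cast hj⟩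
      by_cases hlen :
          1 < (bfsA g L R (g.length : Int) [((i : Int), (j : Int))]
            (pvSetVis st.1 (i : Int) (j : Int)) [((i : Int), (j : Int))]).2.length
      · left
        simp [hlen]
      · right
        have hEP : ¬ EP g L R (g.length : Int) (i : Int) (j : Int) := by
          intro hep
          exact hlen (bfs_start g L R (g.length : Int) st.1 (i : Int) (j : Int) hQ hiR hjR hep)
        have hone :
            (bfsA g L R (g.length : Int) [((i : Int), (j : Int))]
              (pvSetVis st.1 (i : Int) (j : Int)) [((i : Int), (j : Int))]).2.length = 1 := by
          have := bfs_blen_mono g L R (g.length : Int) [((i : Int), (j : Int))]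
            (pvSetVis st.1 (i : Int) (j : Int)) [((i : Int), (j : Int))]
          simp only [List.length_cons, List.length_nil] at this ⊢
          omega
        have hun := bfs_unchanged g L R (g.length : Int) [((i : Int), (j : Int))]
          (pvSetVis st.1 (i : Int) (j : Int)) [((i : Int), (j : Int))] (by simpa using hone)
        rw [hun]
        exact Q_setVis g L R (g.length : Int) st.1 (i : Int) (j : Int) hQ hiR hjR hEP
    · exact Or.inr hQ

theorem v0_Q (g : List (List Int)) (L R : Int) :
    QInv g L R (g.length : Int) (List.replicate g.length (List.replicate g.length (0 : Int))) := by
  intro y x hy hx _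
  rcases hy with ⟨hy0, hy1⟩
  rcases hx with ⟨hx0, hx1⟩
  have h1 : y.toNat < g.length := by omega
  have h2 : x.toNat < g.length := by omega
  unfold pvVis
  simp [List.getD_eq_getElem?_getD, List.getElem?_replicate, h1, h2]

theorem A_true (g : List (List Int)) (L R : Int) (h : hasEdgeZ g L R) :
    move_people g L R = true := by
  rw [move_people_eq]
  have hinv := foldl_pres
    (P := fun (st : List (List Int) × Bool) => st.2 = true ∨ QInv g L R (g.length : Int) st.1)
    (List.range g.length)
    (fun a i hi ha => foldl_pres (List.range g.length)
      (fun a' j hj ha' =>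
        bodyA_inv g L R a' i j (List.mem_range.1 hi) (List.mem_range.1 hj) ha') ha)
    (Or.inr (show QInv g L R (g.length : Int)
      ((List.replicate g.length (List.replicate g.length (0 : Int)), false) :
        List (List Int) × Bool).1 from v0_Q g L R))
  rcases hinv with htrue | hQ
  · exact htrue
  · exfalso
    obtain ⟨y, x, hy, hx, hEP⟩ := h
    have h0 := hQ y x hy hx hEP
    have hcov := range_fold_all
      (fun st i => (List.range g.length).foldl (fun st j => bodyA g L R st i j) st) g.length
      (fun st i => ∀ j, j < g.length → pvVis st.1 (i : Int) (j : Int) ≠ 0)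
      (fun a k m hk => by
        intro j hj
        exact foldl_pres (List.range g.length)
          (fun a' j' _ ha' => bodyA_vis_pres g L R a' m j' (k : Int) (j : Int) ha') (hk j hj))
      (fun a k hk => by
        intro j hj
        exact range_fold_all (fun st j => bodyA g L R st k j) g.length
          (fun st j => pvVis st.1 (k : Int) (j : Int) ≠ 0)
          (fun a' j' m' hj' => bodyA_vis_pres g L R a' k m' (k : Int) (j' : Int) hj')
          (fun a' j' _ => bodyA_vis_self g L R a' k j') a j hj)
      (List.replicate g.length (List.replicate g.length (0 : Int)), false) y.toNat
      (by rcases hy with ⟨h1, h2⟩; omega)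
    have hcov2 := hcov x.toNat (by rcases hx with ⟨h1, h2⟩; omega)
    have hcast : pvVis (((List.range g.length).foldl (fun st i =>
        (List.range g.length).foldl (fun st j => bodyA g L R st i j) st)
        (List.replicate g.length (List.replicate g.length (0 : Int)), false)).1)
        ((y.toNat : Nat) : Int) ((x.toNat : Nat) : Int) =
        pvVis (((List.range g.length).foldl (fun st i =>
        (List.range g.length).foldl (fun st j => bodyA g L R st i j) st)
        (List.replicate g.length (List.replicate g.length (0 : Int)), false)).1) y x := by
      unfold pvVis
      rw [Int.toNat_natCast, Int.toNat_natCast]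
    rw [hcast] at hcov2
    exact hcov2 h0

theorem A_false (g : List (List Int)) (L R : Int) (h : ¬ hasEdgeZ g L R) :
    move_people g L R = false := by
  rw [move_people_eq]
  have hno : ∀ y x : Int, inRZ (g.length : Int) y → inRZ (g.length : Int) x →
      ¬ EP g L R (g.length : Int) y x := fun y x hy hx hep => h ⟨y, x, hy, hx, hep⟩
  apply foldl_pres (P := fun (st : List (List Int) × Bool) => st.2 = false)
  · intro a i hi ha
    apply foldl_pres (P := fun (st : List (List Int) × Bool) => st.2 = false)
    · intro a' j hj ha'
      exact bodyA_false_pres g L R a' i j (List.mem_range.1 hi) (List.mem_range.1 hj) hno ha'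
    · exact ha
  · rfl

theorem foldl_or {β : Type} (l : List β) (f : β → Bool) (b : Bool) :
    l.foldl (fun acc x => acc || f x) b = (b || l.any f) := by
  induction l generalizing b with
  | nil => simp
  | cons c t ih => rw [List.foldl_cons, ih, List.any_cons, Bool.or_assoc]

theorem foldl_fn_congr {α β : Type} (l : List β) (f f' : α → β → α) (a : α)
    (h : ∀ acc x, x ∈ l → f acc x = f' acc x) : l.foldl f a = l.foldl f' a := by
  induction l generalizing a with
  | nil => rfl
  | cons b t ih =>
    rw [List.foldl_cons, List.foldl_cons, h a b (List.mem_cons_self)]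
    exact ih _ (fun acc x hx => h acc x (List.mem_cons_of_mem _ hx))

theorem two_if_or (m a b : Bool) :
    (if b = true then true else if a = true then true else m) = (m || (a || b)) := by
  cases m <;> cases a <;> cases b <;> rfl

theorem alt_any (g : List (List Int)) (L R : Int) :
    move_people_alt g L R =
      (List.range g.length).any (fun i => (List.range g.length).any (fun j =>
        (decide (j + 1 < g.length) && bCond g L R i j i (j + 1)) ||
        (decide (i + 1 < g.length) && bCond g L R i j (i + 1) j))) := by
  unfold move_people_alt
  rw [foldl_fn_congr _ _
    (fun (moved : Bool) (i : Nat) => moved || (List.range g.length).any (fun j =>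
      (decide (j + 1 < g.length) && bCond g L R i j i (j + 1)) ||
      (decide (i + 1 < g.length) && bCond g L R i j (i + 1) j))) false ?_]
  · rw [foldl_or]
    simp
  · intro acc i _
    rw [foldl_fn_congr _ _
      (fun (moved : Bool) (j : Nat) => moved ||
        ((decide (j + 1 < g.length) && bCond g L R i j i (j + 1)) ||
         (decide (i + 1 < g.length) && bCond g L R i j (i + 1) j))) acc ?_]
    · rw [foldl_or]
    · intro acc' j _
      exact two_if_or acc' _ _

theorem pvCell_cast (g : List (List Int)) (i j : Nat) :
    pvCell g (i : Int) (j : Int) = bCell g i j := by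
  unfold pvCell bCell
  rw [Int.toNat_natCast, Int.toNat_natCast]

theorem alt_iff (g : List (List Int)) (L R : Int) :
    move_people_alt g L R = true ↔ hasEdgeZ g L R := by
  rw [alt_any]
  simp only [List.any_eq_true, List.mem_range, Bool.or_eq_true, Bool.and_eq_true,
    decide_eq_true_eq, bCond]
  unfold hasEdgeZ EP condZ inRZ
  constructor
  · rintro ⟨i, hi, j, hj, ⟨hj1, hL, hR⟩ | ⟨hi1, hL, hR⟩⟩
    · refine ⟨(i : Int), (j : Int),
        ⟨Int.natCast_nonneg i, by exact_mod_cast hi⟩,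
        ⟨Int.natCast_nonneg j, by exact_mod_cast hj⟩,
        (0, 1), by simp [pvDirs], ?_, ?_, ?_⟩
      · have e : (i : Int) + 0 = (i : Int) := by ring
        rw [e]
        exact ⟨Int.natCast_nonneg i, by exact_mod_cast hi⟩
      · constructor
        · have := Int.natCast_nonneg j; omega
        · have h' : (j : Int) + 1 < (g.length : Int) := by exact_mod_cast hj1
          exact h'
      · have e1 : (i : Int) + 0 = (i : Int) := by ring
        have e2 : ((j : Int) + 1) = (((j + 1 : Nat)) : Int) := by push_cast; ring
        rw [e1, e2, pvCell_cast, pvCell_cast, abs_sub_comm]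
        exact ⟨hL, hR⟩
    · refine ⟨(i : Int), (j : Int),
        ⟨Int.natCast_nonneg i, by exact_mod_cast hi⟩,
        ⟨Int.natCast_nonneg j, by exact_mod_cast hj⟩,
        (1, 0), by simp [pvDirs], ?_, ?_, ?_⟩
      · constructor
        · have := Int.natCast_nonneg i; omega
        · have h' : (i : Int) + 1 < (g.length : Int) := by exact_mod_cast hi1
          exact h'
      · have e : (j : Int) + 0 = (j : Int) := by ring
        rw [e]
        exact ⟨Int.natCast_nonneg j, by exact_mod_cast hj⟩
      · have e1 : (j : Int) + 0 = (j : Int) := by ring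
        have e2 : ((i : Int) + 1) = (((i + 1 : Nat)) : Int) := by push_cast; ring
        rw [e1, e2, pvCell_cast, pvCell_cast, abs_sub_comm]
        exact ⟨hL, hR⟩
  · rintro ⟨y, x, ⟨hy0, hy1⟩, ⟨hx0, hx1⟩, d, hd, ⟨a1, a2⟩, ⟨b1, b2⟩, hc1, hc2⟩
    simp only [pvDirs, List.mem_cons, List.not_mem_nil, or_false] at hd
    rcases hd with rfl | rfl | rfl | rfl
    · -- d = (0,-1): the pair ((y, x-1), (y, x)) is a rightward edge
      refine ⟨y.toNat, by omega, (x + -1).toNat, by omega, Or.inl ⟨by omega, ?_, ?_⟩⟩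
      all_goals
        have e3 : (x + -1).toNat + 1 = x.toNat := by omega
        have c1 : bCell g y.toNat (x + -1).toNat = pvCell g y (x + -1) := rfl
        have c2 : bCell g y.toNat x.toNat = pvCell g y x := rfl
        have e4 : y + (0 : Int) = y := by ring
        rw [e4] at hc1 hc2
        rw [e3, c1, c2]
      · exact hc1
      · exact hc2
    · -- d = (0,1): rightward edge at (y, x)
      refine ⟨y.toNat, by omega, x.toNat, by omega, Or.inl ⟨by omega, ?_, ?_⟩⟩
      all_goals
        have e3 : x.toNat + 1 = (x + 1).toNat := by omega
        have c1 : bCell g y.toNat x.toNat = pvCell g y x := rfl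
        have c2 : bCell g y.toNat (x + 1).toNat = pvCell g y (x + 1) := rfl
        have e4 : y + (0 : Int) = y := by ring
        rw [e4] at hc1 hc2
        rw [abs_sub_comm] at hc1 hc2
        rw [e3, c1, c2]
      · exact hc1
      · exact hc2
    · -- d = (1,0): downward edge at (y, x)
      refine ⟨y.toNat, by omega, x.toNat, by omega, Or.inr ⟨by omega, ?_, ?_⟩⟩
      all_goals
        have e3 : y.toNat + 1 = (y + 1).toNat := by omega
        have c1 : bCell g y.toNat x.toNat = pvCell g y x := rfl
        have c2 : bCell g (y + 1).toNat x.toNat = pvCell g (y + 1) x := rfl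
        have e4 : x + (0 : Int) = x := by ring
        rw [e4] at hc1 hc2
        rw [abs_sub_comm] at hc1 hc2
        rw [e3, c1, c2]
      · exact hc1
      · exact hc2
    · -- d = (-1,0): the pair ((y-1, x), (y, x)) is a downward edge
      refine ⟨(y + -1).toNat, by omega, x.toNat, by omega, Or.inr ⟨by omega, ?_, ?_⟩⟩
      all_goals
        have e3 : (y + -1).toNat + 1 = y.toNat := by omega
        have c1 : bCell g (y + -1).toNat x.toNat = pvCell g (y + -1) x := rfl
        have c2 : bCell g y.toNat x.toNat = pvCell g y x := rfl
        have e4 : x + (0 : Int) = x := by ring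
        rw [e4] at hc1 hc2
        rw [e3, c1, c2]
      · exact hc1
      · exact hc2

-- ===== VERDICT (by name: the statement is the Claim_ definition above) =====
theorem move_people_spec : Claim_equal_move_people := by
  intro g L R _ _
  unfold Spec_move_people
  by_cases h : hasEdgeZ g L R
  · exact (A_true g L R h).trans ((alt_iff g L R).2 h).symm
  · have hB : move_people_alt g L R = false := by
      cases halt : move_people_alt g L R
      · rfl
      · exact absurd ((alt_iff g L R).1 halt) h
    exact (A_false g L R h).trans hB.symm
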